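-- pv_equiv track=rewrite | github.com/omernesh/ironmind | backend/app/services/generator.py | should_activate_synthesis_mode
-- ===== SOURCE A (Python) =====
-- from typing import List, Dict, Any, Optional
--
-- def should_activate_synthesis_mode(chunks: List[Dict[str, Any]]) -> bool:
--     """
--     Determine if multi-source synthesis mode should activate.
--
--     Threshold: 2+ distinct documents in retrieved chunks, AND
--     at least 2 chunks from each of 2 documents (avoid spurious triggers).
--     """
--     if not chunks:
--         return False
--
--     # Count chunks per document
--     doc_chunk_counts = {}
--     for chunk in chunks:
--         doc_id = chunk.get('doc_id', '')
--         # Skip graph-derived chunks for synthesis trigger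
--         if chunk.get('source') == 'graph':
--             continue
--         doc_chunk_counts[doc_id] = doc_chunk_counts.get(doc_id, 0) + 1
--
--     # Require 2+ documents with 2+ chunks each
--     multi_chunk_docs = sum(1 for count in doc_chunk_counts.values() if count >= 2)
--     return multi_chunk_docs >= 2
-- ===== SOURCE B (Python) =====
-- def should_activate_synthesis_mode(chunks):
--     seen_once = set()
--     qualified = set()
--     for chunk in chunks:
--         if chunk.get('source') == 'graph':
--             continue
--         doc_id = chunk.get('doc_id', '')
--         if doc_id in qualified:
--             continue
--         if doc_id in seen_once:
--             seen_once.discard(doc_id)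
--             qualified.add(doc_id)
--             if len(qualified) >= 2:
--                 return True
--         else:
--             seen_once.add(doc_id)
--     return False
-- ===== Notes on version B (the rewrite author's own statement) =====
-- stated objective: alternative
-- what changed: Replaces the full count-dict plus a values scan with a single pass maintaining two sets (seen-once and qualified doc_ids), promoting a doc on its second non-graph chunk and returning True early as soon as two docs qualify.
import Mathlib
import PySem

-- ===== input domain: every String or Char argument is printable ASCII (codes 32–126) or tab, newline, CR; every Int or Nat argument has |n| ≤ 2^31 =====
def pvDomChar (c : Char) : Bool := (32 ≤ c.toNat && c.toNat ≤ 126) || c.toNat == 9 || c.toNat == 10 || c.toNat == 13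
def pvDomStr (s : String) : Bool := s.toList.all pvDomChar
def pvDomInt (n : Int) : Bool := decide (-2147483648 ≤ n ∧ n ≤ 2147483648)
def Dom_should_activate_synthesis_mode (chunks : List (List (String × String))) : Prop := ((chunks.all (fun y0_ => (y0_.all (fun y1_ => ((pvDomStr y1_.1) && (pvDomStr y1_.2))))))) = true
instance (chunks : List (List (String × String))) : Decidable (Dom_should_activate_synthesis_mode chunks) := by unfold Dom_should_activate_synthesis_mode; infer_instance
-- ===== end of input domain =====

-- B replaces A's count-dict plus values scan with a single pass over two sets (seen-once / qualified) with an early exit; alternative decomposition, same asymptotic cost.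


-- ===== PORT A =====
def should_activate_synthesis_mode (chunks : List (List (String × String))) : Bool :=
  if chunks = [] then false
  else
    let doc_chunk_counts : PySem.Dict String Int :=
      chunks.foldl (fun d chunk =>
        let doc_id := (PySem.Dict.mk chunk).getD "doc_id" ""
        if (PySem.Dict.mk chunk).get? "source" = some "graph" then d
        else d.insert doc_id (d.getD doc_id 0 + 1)) PySem.Dict.empty
    decide (2 ≤ doc_chunk_counts.values.countP (fun c => decide (2 ≤ c)))

-- ===== PORT B =====
def altLoop : List (List (String × String)) → PySem.Set String → PySem.Set String → Bool
  | [], _, _ => false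
  | chunk :: rest, seenOnce, qualified =>
    if (PySem.Dict.mk chunk).get? "source" = some "graph" then
      altLoop rest seenOnce qualified
    else
      let docId := (PySem.Dict.mk chunk).getD "doc_id" ""
      if PySem.Set.contains qualified docId then altLoop rest seenOnce qualified
      else if PySem.Set.contains seenOnce docId then
        let q' := PySem.Set.add qualified docId
        if 2 ≤ q'.length then true
        else altLoop rest (PySem.Set.discard seenOnce docId) q'
      else altLoop rest (PySem.Set.add seenOnce docId) qualified

def should_activate_synthesis_mode_alt (chunks : List (List (String × String))) : Bool :=
  altLoop chunks PySem.Set.empty PySem.Set.empty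

-- ===== PRECONDITION & SPEC =====
def Spec_should_activate_synthesis_mode (chunks : List (List (String × String))) (out : Bool) : Prop := out = should_activate_synthesis_mode_alt chunks
instance (chunks : List (List (String × String))) (out : Bool) : Decidable (Spec_should_activate_synthesis_mode chunks out) := by unfold Spec_should_activate_synthesis_mode; infer_instance

-- ===== CLAIM (what is proved, stated in full; the proofs are below) =====
def Claim_equal_should_activate_synthesis_mode : Prop := ∀ (chunks : List (List (String × String))), Dom_should_activate_synthesis_mode chunks → Spec_should_activate_synthesis_mode chunks (should_activate_synthesis_mode chunks)

-- ===== LEMMAS AND PROOFS =====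

-- the non-graph doc_id of a chunk, if any
def keyOf (chunk : List (String × String)) : Option String :=
  if (PySem.Dict.mk chunk).get? "source" = some "graph" then none
  else some ((PySem.Dict.mk chunk).getD "doc_id" "")

def ids (chunks : List (List (String × String))) : List String := chunks.filterMap keyOf

-- number of distinct doc_ids occurring at least twice
def Qn (L : List String) : ℕ := (L.toFinset.filter (fun k => 2 ≤ L.count k)).card

lemma Qn_mono (P L : List String) : Qn P ≤ Qn (P ++ L) := by
  apply Finset.card_le_card
  intro k hk
  simp only [Finset.mem_filter, List.mem_toFinset] at hk ⊢
  refine ⟨List.mem_append.mpr (Or.inl hk.1), ?_⟩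
  rw [List.count_append]
  omega

lemma length_eq_Qn (P : List String) (s : List String) (hnd : s.Nodup)
    (hm : ∀ k, k ∈ s ↔ 2 ≤ P.count k) : s.length = Qn P := by
  have : s.toFinset = P.toFinset.filter (fun k => 2 ≤ P.count k) := by
    ext k
    simp only [Finset.mem_filter, List.mem_toFinset, hm k]
    constructor
    · intro h; exact ⟨List.count_pos_iff.mp (by omega), h⟩
    · intro h; exact h.2
  calc s.length = s.toFinset.card := (List.toFinset_card_of_nodup hnd).symm
    _ = Qn P := by rw [this]; rfl

lemma altLoop_eq (chunks : List (List (String × String))) :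
    ∀ (P : List String) (s1 s2 : PySem.Set String),
    s1.Nodup → s2.Nodup →
    (∀ k, k ∈ s1 ↔ P.count k = 1) →
    (∀ k, k ∈ s2 ↔ 2 ≤ P.count k) →
    s2.length ≤ 1 →
    altLoop chunks s1 s2 = decide (2 ≤ Qn (P ++ ids chunks)) := by
  induction chunks with
  | nil =>
    intro P s1 s2 _ hnd2 _ hm2 hlen
    have hq : Qn P ≤ 1 := (length_eq_Qn P s2 hnd2 hm2) ▸ hlen
    have hlt : ¬ (2 ≤ Qn (P ++ ids [])) := by
      simp only [ids, List.filterMap_nil, List.append_nil]; omega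
    simp [altLoop, hlt]
  | cons chunk rest ih =>
    intro P s1 s2 hnd1 hnd2 hm1 hm2 hlen
    by_cases hg : (PySem.Dict.mk chunk).get? "source" = some "graph"
    · rw [show ids (chunk :: rest) = ids rest by simp [ids, keyOf, hg]]
      rw [altLoop, if_pos hg]
      exact ih P s1 s2 hnd1 hnd2 hm1 hm2 hlen
    · set k := (PySem.Dict.mk chunk).getD "doc_id" "" with hk
      have hids : ids (chunk :: rest) = k :: ids rest := by
        rw [hk]; simp [ids, keyOf, hg]
      have hassoc : P ++ ids (chunk :: rest) = (P ++ [k]) ++ ids rest := by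
        simp [hids]
      have hcnt : ∀ x, (P ++ [k]).count x = P.count x + (if x = k then 1 else 0) := by
        intro x
        by_cases h : x = k
        · subst h; simp [List.count_append]
        · have h' : ¬ (k = x) := fun e => h e.symm
          simp [List.count_append, h, h']
      rw [altLoop, if_neg hg, hassoc]
      by_cases h2 : k ∈ s2
      · have hk2 : 2 ≤ P.count k := (hm2 k).mp h2
        rw [if_pos ((PySem.Set.contains_iff s2 k).mpr h2)]
        apply ih (P ++ [k]) s1 s2 hnd1 hnd2
        · intro x; rw [hm1 x, hcnt x]
          split_ifs with h
          · subst h; omega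
          · omega
        · intro x; rw [hm2 x, hcnt x]
          split_ifs with h
          · subst h; omega
          · omega
        · exact hlen
      · rw [if_neg (by rw [PySem.Set.contains_iff]; exact h2)]
        by_cases h1 : k ∈ s1
        · have hk1 : P.count k = 1 := (hm1 k).mp h1
          rw [if_pos ((PySem.Set.contains_iff s1 k).mpr h1)]
          have hq' : PySem.Set.add s2 k = s2 ++ [k] := PySem.Set.add_of_not_mem h2
          have hq'nd : (s2 ++ [k]).Nodup := by
            refine List.Nodup.append hnd2 (List.nodup_singleton k) ?_
            intro a ha hb
            exact h2 ((List.mem_singleton.mp hb) ▸ ha)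
          have hq'mem : ∀ x, x ∈ s2 ++ [k] ↔ 2 ≤ (P ++ [k]).count x := by
            intro x
            rw [List.mem_append, List.mem_singleton, hm2 x, hcnt x]
            split_ifs with h
            · subst h; simp only [or_true, true_iff]; omega
            · simp only [h, or_false]; omega
          by_cases hlen2 : 2 ≤ (PySem.Set.add s2 k).length
          · rw [if_pos hlen2]
            have hlq : (s2 ++ [k]).length = Qn (P ++ [k]) :=
              length_eq_Qn (P ++ [k]) (s2 ++ [k]) hq'nd hq'mem
            have hmono := Qn_mono (P ++ [k]) (ids rest)
            rw [hq'] at hlen2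
            have hge : 2 ≤ Qn ((P ++ [k]) ++ ids rest) := by omega
            exact (decide_eq_true hge).symm
          · rw [if_neg hlen2]
            apply ih (P ++ [k]) (PySem.Set.discard s1 k) (PySem.Set.add s2 k)
              (PySem.Set.nodup_discard s1 k hnd1) (hq' ▸ hq'nd)
            · intro x
              rw [PySem.Set.mem_discard, hm1 x, hcnt x]
              split_ifs with h
              · subst h; simp; omega
              · simp only [h, and_true, ne_eq, not_false_iff]; omega
            · intro x; rw [hq']; exact hq'mem x
            · omega
        · have hk0 : P.count k = 0 := by
            have ha := (hm1 k).not.mp h1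
            have hb := (hm2 k).not.mp h2
            omega
          rw [if_neg (by rw [PySem.Set.contains_iff]; exact h1)]
          apply ih (P ++ [k]) (PySem.Set.add s1 k) s2
            (PySem.Set.nodup_add s1 k hnd1) hnd2
          · intro x
            rw [PySem.Set.mem_add, hm1 x, hcnt x]
            split_ifs with h
            · subst h; simp only [or_true, true_iff]; omega
            · simp only [h, or_false]; omega
          · intro x; rw [hm2 x, hcnt x]
            split_ifs with h
            · subst h; omega
            · omega
          · exact hlen

lemma alt_eq (chunks : List (List (String × String))) :
    should_activate_synthesis_mode_alt chunks = decide (2 ≤ Qn (ids chunks)) := by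
  have h := altLoop_eq chunks [] PySem.Set.empty PySem.Set.empty
    List.nodup_nil List.nodup_nil (by simp [PySem.Set.empty])
    (by simp [PySem.Set.empty]) (by simp [PySem.Set.empty])
  simpa [should_activate_synthesis_mode_alt] using h

lemma fold_eq_ids (chunks : List (List (String × String))) :
    ∀ d : PySem.Dict String Int,
    chunks.foldl (fun d chunk =>
        let doc_id := (PySem.Dict.mk chunk).getD "doc_id" ""
        if (PySem.Dict.mk chunk).get? "source" = some "graph" then d
        else d.insert doc_id (d.getD doc_id 0 + 1)) d
      = (ids chunks).foldl (fun d x => d.insert x (d.getD x 0 + 1)) d := by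
  induction chunks with
  | nil => intro d; simp [ids]
  | cons chunk rest ih =>
    intro d
    by_cases hg : (PySem.Dict.mk chunk).get? "source" = some "graph"
    · simp only [List.foldl_cons]
      rw [if_pos hg, show ids (chunk :: rest) = ids rest by simp [ids, keyOf, hg]]
      exact ih d
    · simp only [List.foldl_cons]
      rw [if_neg hg, show ids (chunk :: rest)
            = (PySem.Dict.mk chunk).getD "doc_id" "" :: ids rest by simp [ids, keyOf, hg]]
      simp only [List.foldl_cons]
      exact ih _

lemma a_eq (chunks : List (List (String × String))) :
    should_activate_synthesis_mode chunks = decide (2 ≤ Qn (ids chunks)) := by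
  by_cases hnil : chunks = []
  · subst hnil; simp [should_activate_synthesis_mode, Qn, ids]
  · rw [should_activate_synthesis_mode, if_neg hnil]
    rw [fold_eq_ids chunks PySem.Dict.empty]
    set L := ids chunks with hL
    rw [show L.foldl (fun d x => d.insert x (d.getD x 0 + 1)) PySem.Dict.empty
          = PySem.Dict.counter L from PySem.Dict.foldl_insert_getD_add_one_eq_counter L]
    have hv : (PySem.Dict.counter L).values
        = (PySem.Set.ofList L).map (fun k => (L.count k : Int)) := by
      show ((PySem.Dict.counter L).items.map (·.2)) = _
      rw [PySem.Dict.items_counter]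
      simp
    show decide (2 ≤ List.countP (fun c => decide (2 ≤ c)) (PySem.Dict.counter L).values)
        = decide (2 ≤ Qn L)
    rw [hv, List.countP_map]
    have hcg : (PySem.Set.ofList L).countP
          ((fun c => decide (2 ≤ c)) ∘ (fun k => ((L.count k : Nat) : Int)))
        = (PySem.Set.ofList L).countP (fun k => decide (2 ≤ L.count k)) := by
      apply List.countP_congr
      intro k _
      simp only [Function.comp_apply]
      simp only [decide_eq_true_eq]
      exact_mod_cast Iff.rfl
    rw [hcg]
    have hcp : (PySem.Set.ofList L).countP (fun k => decide (2 ≤ L.count k))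
        = Qn L := by
      rw [List.countP_eq_length_filter]
      apply length_eq_Qn
      · exact List.Nodup.filter _ (PySem.Set.nodup_ofList L)
      · intro x
        rw [List.mem_filter]
        simp only [PySem.Set.mem_ofList, decide_eq_true_eq]
        constructor
        · rintro ⟨_, h⟩; exact h
        · intro h; exact ⟨List.count_pos_iff.mp (by omega), h⟩
    rw [hcp]

-- ===== VERDICT (by name: the statement is the Claim_ definition above) =====
theorem should_activate_synthesis_mode_spec : Claim_equal_should_activate_synthesis_mode := by
  intro chunks _
  unfold Spec_should_activate_synthesis_mode
  rw [a_eq, alt_eq]
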